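-- pv_equiv track=rewrite | github.com/jo-narae/chatbot-example-kosta | 11.cs-chatbot/02.cs_limit.py | make_faq
-- ===== SOURCE A (Python) =====
-- def make_faq(n: int, hidden_answer_index: int | None = None) -> str:
--     """N개의 FAQ를 만든다. hidden_answer_index 위치에 '정답'을 숨겨둔다."""
--     categories = ["배송", "교환", "환불", "포인트", "회원", "결제", "상품", "이벤트", "쿠폰", "앱"]
--     lines = []
--     for i in range(n):
--         if i == hidden_answer_index:
--             # 진짜 정답을 한 줄 숨겨둠
--             lines.append(
--                 "Q: 새벽 배송 마감 시간이 몇 시인가요? "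
--                 "→ 새벽 배송은 밤 11시(23:00)까지 주문하시면 다음날 오전 7시 전에 도착합니다. 수도권만 가능합니다."
--             )
--         else:
--             cat = categories[i % len(categories)]
--             lines.append(
--                 f"Q: {cat} 관련 일반 안내 {i+1}번 "
--                 f"→ {cat}에 대한 일반적인 답변입니다. 자세한 사항은 고객센터로 문의해 주세요. "
--                 f"운영시간은 평일 09시부터 18시까지이며, 주말과 공휴일은 휴무입니다."
--             )
--     return "\n".join(lines)
-- ===== SOURCE B (Python) =====
-- SECRET = (
--     "Q: 새벽 배송 마감 시간이 몇 시인가요? "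
--     "→ 새벽 배송은 밤 11시(23:00)까지 주문하시면 다음날 오전 7시 전에 도착합니다. 수도권만 가능합니다."
-- )
--
-- CATEGORIES = ["배송", "교환", "환불", "포인트", "회원", "결제", "상품", "이벤트", "쿠폰", "앱"]
--
--
-- def _normal(i: int) -> str:
--     cat = CATEGORIES[i % len(CATEGORIES)]
--     return (
--         f"Q: {cat} 관련 일반 안내 {i+1}번 "
--         f"→ {cat}에 대한 일반적인 답변입니다. 자세한 사항은 고객센터로 문의해 주세요. "
--         f"운영시간은 평일 09시부터 18시까지이며, 주말과 공휴일은 휴무입니다."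
--     )
--
--
-- def _block(lo: int, hi: int) -> str:
--     """Joined run of normal FAQ lines for indices lo..hi-1."""
--     return "\n".join(_normal(i) for i in range(lo, hi))
--
--
-- def make_faq(n: int, hidden_answer_index: int | None = None) -> str:
--     """N개의 FAQ를 만든다. hidden_answer_index 위치에 '정답'을 숨겨둔다."""
--     j = hidden_answer_index
--     if j is None or j < 0 or j >= n:
--         return _block(0, n)
--     # splice: prefix segment, the secret line, suffix segment
--     parts = []
--     if j > 0:
--         parts.append(_block(0, j))
--     parts.append(SECRET)
--     if j + 1 < n:
--         parts.append(_block(j + 1, n))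
--     return "\n".join(parts)
-- ===== Notes on version B (the rewrite author's own statement) =====
-- stated objective: alternative
-- what changed: B never iterates over the hidden index at all: it splices the output from up to three independently generated segments (prefix block of normal lines, the secret line, suffix block), while A makes one pass over all indices with a per-iteration secret-vs-normal branch.
import Mathlib
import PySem

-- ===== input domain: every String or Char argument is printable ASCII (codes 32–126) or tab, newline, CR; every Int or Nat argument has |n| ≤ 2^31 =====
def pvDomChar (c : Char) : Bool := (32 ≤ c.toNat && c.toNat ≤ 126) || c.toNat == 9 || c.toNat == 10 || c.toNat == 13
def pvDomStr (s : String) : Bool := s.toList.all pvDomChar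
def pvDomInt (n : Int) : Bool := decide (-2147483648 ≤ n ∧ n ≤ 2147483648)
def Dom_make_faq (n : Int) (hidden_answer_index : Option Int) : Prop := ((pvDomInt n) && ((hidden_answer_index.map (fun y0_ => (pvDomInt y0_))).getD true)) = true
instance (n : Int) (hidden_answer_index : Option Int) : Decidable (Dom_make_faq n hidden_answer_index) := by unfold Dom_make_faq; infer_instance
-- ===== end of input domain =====

-- B splices the output from up to three independently generated segments (prefix block, secret line, suffix block) instead of A's single pass with a per-iteration branch (alternative decomposition, same cost).

-- ===== PORT A =====
def pvCatsA : List String := ["배송", "교환", "환불", "포인트", "회원", "결제", "상품", "이벤트", "쿠폰", "앱"]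

def pvSecretA : String :=
  "Q: 새벽 배송 마감 시간이 몇 시인가요? " ++
  "→ 새벽 배송은 밤 11시(23:00)까지 주문하시면 다음날 오전 7시 전에 도착합니다. 수도권만 가능합니다."

def pvNormalA (i : Int) : String :=
  let cat := PySem.List.pyGetD pvCatsA (PySem.Int.mod i (pvCatsA.length : Int)) ""
  "Q: " ++ cat ++ " 관련 일반 안내 " ++ PySem.Int.toStr (i + 1) ++ "번 " ++
  "→ " ++ cat ++ "에 대한 일반적인 답변입니다. 자세한 사항은 고객센터로 문의해 주세요. " ++
  "운영시간은 평일 09시부터 18시까지이며, 주말과 공휴일은 휴무입니다."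

def make_faq (n : Int) (hidden_answer_index : Option Int) : String :=
  let lines : List String :=
    (PySem.List.pyRange 0 n 1).foldl
      (fun lines i =>
        if some i == hidden_answer_index then lines ++ [pvSecretA]
        else lines ++ [pvNormalA i])
      []
  PySem.Str.join "\n" lines

-- ===== PORT B =====
def pvSecretB : String :=
  "Q: 새벽 배송 마감 시간이 몇 시인가요? " ++
  "→ 새벽 배송은 밤 11시(23:00)까지 주문하시면 다음날 오전 7시 전에 도착합니다. 수도권만 가능합니다."

def pvCatsB : List String := ["배송", "교환", "환불", "포인트", "회원", "결제", "상품", "이벤트", "쿠폰", "앱"]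

def pvNormalB (i : Int) : String :=
  let cat := PySem.List.pyGetD pvCatsB (PySem.Int.mod i (pvCatsB.length : Int)) ""
  "Q: " ++ cat ++ " 관련 일반 안내 " ++ PySem.Int.toStr (i + 1) ++ "번 " ++
  "→ " ++ cat ++ "에 대한 일반적인 답변입니다. 자세한 사항은 고객센터로 문의해 주세요. " ++
  "운영시간은 평일 09시부터 18시까지이며, 주말과 공휴일은 휴무입니다."

-- _block(lo, hi): joined run of normal FAQ lines for indices lo..hi-1
def pvBlockB (lo hi : Int) : String :=
  PySem.Str.join "\n" ((PySem.List.pyRange lo hi 1).map pvNormalB)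

def make_faq_alt (n : Int) (hidden_answer_index : Option Int) : String :=
  match hidden_answer_index with
  | none => pvBlockB 0 n
  | some j =>
    if j < 0 ∨ n ≤ j then pvBlockB 0 n
    else
      let parts : List String :=
        (if 0 < j then [pvBlockB 0 j] else []) ++ [pvSecretB] ++
        (if j + 1 < n then [pvBlockB (j + 1) n] else [])
      PySem.Str.join "\n" parts

-- ===== PRECONDITION & SPEC =====
def Spec_make_faq (n : Int) (hidden_answer_index : Option Int) (out : String) : Prop := out = make_faq_alt n hidden_answer_index
instance (n : Int) (hidden_answer_index : Option Int) (out : String) : Decidable (Spec_make_faq n hidden_answer_index out) := by unfold Spec_make_faq; infer_instance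

-- ===== CLAIM =====
def Claim_equal_make_faq : Prop := ∀ (n : Int) (hidden_answer_index : Option Int), Dom_make_faq n hidden_answer_index → Spec_make_faq n hidden_answer_index (make_faq n hidden_answer_index)

-- ===== LEMMAS AND PROOFS =====

theorem pvSecret_eq : pvSecretA = pvSecretB := rfl

theorem pvNormal_eq : pvNormalA = pvNormalB := rfl

theorem pvJoin_cons_cons (sep s t : String) (rest : List String) :
    PySem.Str.join sep (s :: t :: rest) = s ++ sep ++ PySem.Str.join sep (t :: rest) := by
  apply String.toList_injective
  simp [PySem.Str.toList_join, PySem.Chars.join_cons_cons]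

theorem pvJoin_singleton (sep s : String) : PySem.Str.join sep [s] = s := by
  apply String.toList_injective
  simp [PySem.Str.toList_join, PySem.Chars.join_singleton]

theorem pvJoin_append_cons (sep : String) (a : String) (l1 l2 : List String) (h : l2 ≠ []) :
    PySem.Str.join sep (a :: l1 ++ l2) = PySem.Str.join sep (a :: l1) ++ sep ++ PySem.Str.join sep l2 := by
  induction l1 generalizing a with
  | nil =>
    obtain ⟨b, l2', rfl⟩ := List.exists_cons_of_ne_nil h
    rw [show ((a :: ([] : List String)) ++ b :: l2') = a :: b :: l2' from by simp,
        pvJoin_cons_cons, pvJoin_singleton]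
  | cons c cs ih =>
    rw [show ((a :: c :: cs) ++ l2) = a :: c :: (cs ++ l2) from by simp,
        pvJoin_cons_cons,
        show (c :: (cs ++ l2)) = c :: cs ++ l2 from by simp,
        ih c, pvJoin_cons_cons]
    simp [String.append_assoc]

theorem pvJoin_append (sep : String) (l1 l2 : List String) (h1 : l1 ≠ []) (h2 : l2 ≠ []) :
    PySem.Str.join sep (l1 ++ l2) = PySem.Str.join sep l1 ++ sep ++ PySem.Str.join sep l2 := by
  obtain ⟨a, l1', rfl⟩ := List.exists_cons_of_ne_nil h1
  exact pvJoin_append_cons sep a l1' l2 h2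

theorem pvRange_map_ne_nil (a b : Int) (h : a < b) :
    ((PySem.List.pyRange a b 1).map pvNormalB) ≠ [] := by
  intro hc
  have := congrArg List.length hc
  rw [List.length_map, PySem.List.length_pyRange_one] at this
  simp at this
  omega

-- A's fold produces the map of a per-index choice function
theorem pvALines_eq_map (n : Int) (h : Option Int) :
    (PySem.List.pyRange 0 n 1).foldl
      (fun lines i =>
        if some i == h then lines ++ [pvSecretA] else lines ++ [pvNormalA i]) []
    = (PySem.List.pyRange 0 n 1).map
        (fun i => if some i == h then pvSecretA else pvNormalA i) := by
  have hfun : (fun (lines : List String) (i : Int) =>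
        if some i == h then lines ++ [pvSecretA] else lines ++ [pvNormalA i])
      = (fun (lines : List String) (i : Int) =>
        lines ++ [if some i == h then pvSecretA else pvNormalA i]) := by
    funext lines i
    by_cases hc : (some i == h) = true <;> simp [hc]
  rw [hfun, PySem.List.foldl_append_singleton_eq_map, List.nil_append]

-- ===== VERDICT =====
theorem make_faq_spec : Claim_equal_make_faq := by
  intro n h _
  unfold Spec_make_faq make_faq make_faq_alt
  rw [pvALines_eq_map]
  cases h with
  | none =>
    simp [pvBlockB, pvNormal_eq]
  | some j =>
    dsimp only
    by_cases hout : j < 0 ∨ n ≤ j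
    · rw [if_pos hout]
      unfold pvBlockB
      congr 1
      apply List.map_congr_left
      intro i hi
      have hmem := PySem.List.mem_pyRange_one.mp hi
      have hne : ¬ (i = j) := by omega
      simp [hne, pvNormal_eq]
    · rw [if_neg hout]
      push_neg at hout
      obtain ⟨hj0, hjn⟩ := hout
      -- split the range at j
      have hsplit : PySem.List.pyRange 0 n 1
          = PySem.List.pyRange 0 j 1 ++ (j :: PySem.List.pyRange (j+1) n 1) := by
        rw [PySem.List.pyRange_one_append 0 j n hj0 (le_of_lt hjn),
            PySem.List.pyRange_one_cons hjn]
      rw [hsplit, List.map_append]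
      have hmap1 : (PySem.List.pyRange 0 j 1).map
            (fun i => if some i == some j then pvSecretA else pvNormalA i)
          = (PySem.List.pyRange 0 j 1).map pvNormalB := by
        apply List.map_congr_left
        intro i hi
        have hmem := PySem.List.mem_pyRange_one.mp hi
        have hne : ¬ (i = j) := by omega
        simp [hne, pvNormal_eq]
      have hmap2 : (PySem.List.pyRange (j+1) n 1).map
            (fun i => if some i == some j then pvSecretA else pvNormalA i)
          = (PySem.List.pyRange (j+1) n 1).map pvNormalB := by
        apply List.map_congr_left
        intro i hi
        have hmem := PySem.List.mem_pyRange_one.mp hi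
        have hne : ¬ (i = j) := by omega
        simp [hne, pvNormal_eq]
      rw [List.map_cons, hmap1, hmap2]
      simp only [BEq.rfl, if_pos]
      set l1 := (PySem.List.pyRange 0 j 1).map pvNormalB with hl1
      set l2 := (PySem.List.pyRange (j+1) n 1).map pvNormalB with hl2
      by_cases hj : 0 < j
      · have hl1ne : l1 ≠ [] := pvRange_map_ne_nil 0 j hj
        by_cases hjn1 : j + 1 < n
        · have hl2ne : l2 ≠ [] := pvRange_map_ne_nil (j+1) n hjn1
          rw [if_pos hj, if_pos hjn1]
          rw [show (l1 ++ (pvSecretA :: l2)) = l1 ++ ([pvSecretA] ++ l2) from by simp,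
              ← List.append_assoc,
              pvJoin_append _ (l1 ++ [pvSecretA]) l2 (by simp) hl2ne,
              pvJoin_append _ l1 [pvSecretA] hl1ne (by simp),
              pvJoin_singleton]
          rw [show ([pvBlockB 0 j] ++ [pvSecretB] ++ [pvBlockB (j+1) n])
                = pvBlockB 0 j :: pvSecretB :: [pvBlockB (j+1) n] from by simp,
              pvJoin_cons_cons, pvJoin_cons_cons, pvJoin_singleton]
          simp [pvBlockB, pvSecret_eq, String.append_assoc, hl1, hl2]
        · have hl2nil : l2 = [] := by
            rw [hl2, PySem.List.pyRange_one_eq_nil (by omega), List.map_nil]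
          rw [if_pos hj, if_neg hjn1, hl2nil, List.append_nil]
          rw [pvJoin_append _ l1 [pvSecretA] hl1ne (by simp), pvJoin_singleton]
          rw [show ([pvBlockB 0 j] ++ [pvSecretB] : List String)
                = pvBlockB 0 j :: [pvSecretB] from by simp,
              pvJoin_cons_cons, pvJoin_singleton]
          simp [pvBlockB, pvSecret_eq, hl1]
      · have hl1nil : l1 = [] := by
          rw [hl1, PySem.List.pyRange_one_eq_nil (by omega), List.map_nil]
        rw [if_neg hj, hl1nil, List.nil_append]
        by_cases hjn1 : j + 1 < n
        · have hl2ne : l2 ≠ [] := pvRange_map_ne_nil (j+1) n hjn1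
          rw [if_pos hjn1]
          rw [show (pvSecretA :: l2) = [pvSecretA] ++ l2 from by simp,
              pvJoin_append _ [pvSecretA] l2 (by simp) hl2ne, pvJoin_singleton]
          rw [show (([] : List String) ++ [pvSecretB] ++ [pvBlockB (j+1) n])
                = pvSecretB :: [pvBlockB (j+1) n] from by simp,
              pvJoin_cons_cons, pvJoin_singleton]
          simp [pvBlockB, pvSecret_eq, hl2]
        · have hl2nil : l2 = [] := by
            rw [hl2, PySem.List.pyRange_one_eq_nil (by omega), List.map_nil]
          rw [if_neg hjn1, hl2nil]
          simp [pvJoin_singleton, pvSecret_eq]
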